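-- pv_equiv track=rewrite | github.com/Andresvelascofdez/SAP-Assistant | Proyectos/Asistente SAP/scripts/feed_knowledge.py | _infer_metadata_from_filename
-- ===== SOURCE A (Python) =====
-- from typing import List, Dict
--
-- def _infer_metadata_from_filename(filename: str) -> Dict:
--     """Inferir metadatos del nombre del archivo"""
--     metadata = {"system": "IS-U", "type": "general"}
--
--     filename_lower = filename.lower()
--
--     # Inferir tema
--     if any(word in filename_lower for word in ['tabla', 'table']):
--         metadata["topic"] = "master-data"
--         metadata["type"] = "table_documentation"
--     elif any(word in filename_lower for word in ['proceso', 'process']):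
--         metadata["topic"] = "business-process"
--         metadata["type"] = "process_documentation"
--     elif any(word in filename_lower for word in ['incidencia', 'error', 'problem']):
--         metadata["topic"] = "troubleshooting"
--         metadata["type"] = "incident_solution"
--     elif any(word in filename_lower for word in ['config', 'customizing']):
--         metadata["topic"] = "configuration"
--         metadata["type"] = "configuration_guide"
--
--     return metadata
-- ===== SOURCE B (Python) =====
-- _KEYWORD_RULE = {
--     'tabla': 0, 'table': 0,
--     'proceso': 1, 'process': 1,
--     'incidencia': 2, 'error': 2, 'problem': 2,
--     'config': 3, 'customizing': 3,
-- }
--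
-- _RULE_OUT = [
--     ('master-data', 'table_documentation'),
--     ('business-process', 'process_documentation'),
--     ('troubleshooting', 'incident_solution'),
--     ('configuration', 'configuration_guide'),
-- ]
--
-- def _infer_metadata_from_filename(filename: str):
--     """Inferir metadatos del nombre del archivo (keyword-index version)"""
--     fl = filename.lower()
--     hits = [rule for kw, rule in _KEYWORD_RULE.items() if kw in fl]
--     if not hits:
--         return {"system": "IS-U", "type": "general"}
--     topic, doc_type = _RULE_OUT[min(hits)]
--     return {"system": "IS-U", "type": doc_type, "topic": topic}
-- ===== Notes on version B (the rewrite author's own statement) =====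
-- stated objective: alternative
-- what changed: Replaces the first-match if/elif chain and in-place dict mutation by a keyword-to-priority index: a comprehension collects the priorities of ALL keywords found in the filename, min() picks the highest-precedence rule, and the result dict is constructed directly in one expression.
import Mathlib
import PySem

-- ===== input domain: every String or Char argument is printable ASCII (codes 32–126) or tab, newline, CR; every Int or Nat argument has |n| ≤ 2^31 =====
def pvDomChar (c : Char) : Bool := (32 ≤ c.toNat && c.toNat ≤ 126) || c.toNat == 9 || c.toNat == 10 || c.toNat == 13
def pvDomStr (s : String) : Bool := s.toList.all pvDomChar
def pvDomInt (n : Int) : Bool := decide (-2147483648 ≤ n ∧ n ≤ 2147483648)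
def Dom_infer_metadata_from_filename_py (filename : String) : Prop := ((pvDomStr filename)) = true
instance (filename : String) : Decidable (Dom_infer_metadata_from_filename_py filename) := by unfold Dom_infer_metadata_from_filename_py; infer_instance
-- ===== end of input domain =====

-- B replaces the first-match if/elif chain by a keyword→priority index: collect ALL matching
-- keywords, take the minimum priority, and build the dict directly (objective: idiomatic).

-- ===== PORT A =====
-- literal port of A: mutable dict, if/elif chain over any(word in filename_lower ...)
def infer_metadata_from_filename_py (filename : String) : List (String × String) :=
  let metadata : PySem.Dict String String := PySem.Dict.ofList [("system", "IS-U"), ("type", "general")]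
  let filename_lower := PySem.Str.lower filename
  let metadata :=
    if ["tabla", "table"].any (fun w => PySem.Str.isIn w filename_lower) then
      (metadata.insert "topic" "master-data").insert "type" "table_documentation"
    else if ["proceso", "process"].any (fun w => PySem.Str.isIn w filename_lower) then
      (metadata.insert "topic" "business-process").insert "type" "process_documentation"
    else if ["incidencia", "error", "problem"].any (fun w => PySem.Str.isIn w filename_lower) then
      (metadata.insert "topic" "troubleshooting").insert "type" "incident_solution"
    else if ["config", "customizing"].any (fun w => PySem.Str.isIn w filename_lower) then
      (metadata.insert "topic" "configuration").insert "type" "configuration_guide"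
    else metadata
  metadata.items

-- ===== PORT B =====
-- _KEYWORD_RULE: keyword → rule priority (assoc list, dict insertion order)
def pvKeywordRule : List (String × Nat) :=
  [ ("tabla", 0), ("table", 0)
  , ("proceso", 1), ("process", 1)
  , ("incidencia", 2), ("error", 2), ("problem", 2)
  , ("config", 3), ("customizing", 3) ]

-- _RULE_OUT[i] = (topic, doc_type)
def pvRuleOut : List (String × String) :=
  [ ("master-data", "table_documentation")
  , ("business-process", "process_documentation")
  , ("troubleshooting", "incident_solution")
  , ("configuration", "configuration_guide") ]

-- port of B: comprehension over the keyword index, min of the hit priorities, direct construction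
def infer_metadata_from_filename_py_alt (filename : String) : List (String × String) :=
  let fl := PySem.Str.lower filename
  let hits := (pvKeywordRule.filter (fun p => PySem.Str.isIn p.1 fl)).map Prod.snd
  match PySem.List.min? hits (fun x => x) with
  | none => [("system", "IS-U"), ("type", "general")]
  | some i =>
      let out := pvRuleOut.getD i ("", "")
      [("system", "IS-U"), ("type", out.2), ("topic", out.1)]

-- ===== PRECONDITION & SPEC =====
def Spec_infer_metadata_from_filename_py (filename : String) (out : List (String × String)) : Prop := out = infer_metadata_from_filename_py_alt filename
instance (filename : String) (out : List (String × String)) : Decidable (Spec_infer_metadata_from_filename_py filename out) := by unfold Spec_infer_metadata_from_filename_py; infer_instance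

-- ===== CLAIM (what is proved, stated in full; the proofs are below) =====
def Claim_equal_infer_metadata_from_filename_py : Prop := ∀ (filename : String), Dom_infer_metadata_from_filename_py filename → Spec_infer_metadata_from_filename_py filename (infer_metadata_from_filename_py filename)

-- ===== LEMMAS AND PROOFS =====
-- (the whole proof: reduce both ports to the nine keyword-membership booleans, then check all 512 cases)

-- ===== VERDICT (by name: the statement is the Claim_ definition above) =====
theorem infer_metadata_from_filename_py_spec : Claim_equal_infer_metadata_from_filename_py := by
  intro filename _
  unfold Spec_infer_metadata_from_filename_py
  unfold infer_metadata_from_filename_py infer_metadata_from_filename_py_alt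
  simp only [pvKeywordRule, List.any_cons, List.any_nil, Bool.or_false,
    List.filter_cons, List.filter_nil]
  generalize PySem.Str.isIn "tabla" (PySem.Str.lower filename) = b1
  generalize PySem.Str.isIn "table" (PySem.Str.lower filename) = b2
  generalize PySem.Str.isIn "proceso" (PySem.Str.lower filename) = b3
  generalize PySem.Str.isIn "process" (PySem.Str.lower filename) = b4
  generalize PySem.Str.isIn "incidencia" (PySem.Str.lower filename) = b5
  generalize PySem.Str.isIn "error" (PySem.Str.lower filename) = b6
  generalize PySem.Str.isIn "problem" (PySem.Str.lower filename) = b7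
  generalize PySem.Str.isIn "config" (PySem.Str.lower filename) = b8
  generalize PySem.Str.isIn "customizing" (PySem.Str.lower filename) = b9
  revert b1 b2 b3 b4 b5 b6 b7 b8 b9
  decide
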